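-- pv_equiv track=rewrite | github.com/alexespencer/euler | problems/p75.py | generate_pythag_triples
-- ===== SOURCE A (Python) =====
-- def generate_pythag_triples(m, n, max_length):
--     triples = []
--
--     a = m ** 2 - n ** 2
--     b = 2 * m * n
--     c = m ** 2 + n ** 2
--     k = 1
--     while True:
--         if (k * a) + (k * b) + (k * c) > max_length:
--             break
--
--         triples.append(tuple(sorted([k * a, k * b, k * c])))
--         k += 1
--
--     return triples
-- ===== SOURCE B (Python) =====
-- def generate_pythag_triples(m, n, max_length):
--     a = m * m - n * n
--     b = 2 * m * n
--     c = m * m + n * n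
--     lo, mid, hi = sorted((a, b, c))
--     k = max_length // (a + b + c)
--     triples = []
--     x, y, z = k * lo, k * mid, k * hi
--     while k >= 1:
--         triples.insert(0, (x, y, z))
--         x, y, z = x - lo, y - mid, z - hi
--         k -= 1
--     return triples
-- ===== Notes on version B (the rewrite author's own statement) =====
-- stated objective: alternative
-- what changed: B builds the list back-to-front: it sorts the base triple once, jumps straight to the largest multiple kmax = max_length // (a+b+c), and then walks DOWN, prepending each triple and obtaining the next (smaller) one by componentwise SUBTRACTION of the base triple, so there is no per-iteration sum/re-sort/multiplication and no break test; A walks up with a while-True loop that re-sums, re-sorts and re-multiplies each k.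
-- outside the precondition, e.g. on generate_pythag_triples(0, 1, -5): A returns [], B raises ZeroDivisionError
import Mathlib
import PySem

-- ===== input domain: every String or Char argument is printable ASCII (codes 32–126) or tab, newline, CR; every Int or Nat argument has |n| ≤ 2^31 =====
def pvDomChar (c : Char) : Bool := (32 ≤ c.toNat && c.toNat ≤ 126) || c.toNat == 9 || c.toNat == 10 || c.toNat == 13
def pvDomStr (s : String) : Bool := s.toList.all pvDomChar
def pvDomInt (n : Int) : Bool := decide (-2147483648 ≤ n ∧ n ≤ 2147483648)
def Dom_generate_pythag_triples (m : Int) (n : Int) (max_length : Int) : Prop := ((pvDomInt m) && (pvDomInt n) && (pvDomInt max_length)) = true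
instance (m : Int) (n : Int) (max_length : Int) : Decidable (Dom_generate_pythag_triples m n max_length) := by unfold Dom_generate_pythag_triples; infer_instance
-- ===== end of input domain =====

-- B builds the result back-to-front: one sort, one division to find the largest multiple,
-- then a countdown that prepends and updates the running triple by componentwise subtraction —
-- instead of A's while-True loop that re-sums, re-sorts and re-multiplies each k (objective: alternative).


-- ===== PORT A =====
-- tuple(sorted([x, y, z])) for three ints (both Pythons call sorted on a 3-element list/tuple)
def pySort3 (x y z : Int) : Int × Int × Int :=
  match PySem.List.sorted [x, y, z] (fun v => v) false with
  | [p, q, r] => (p, q, r)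
  | _ => (x, y, z)  -- unreachable: sorted preserves length

-- A's 'while True' loop. Fuel only makes the recursion total: under Pre_ (perimeter ≥ 2)
-- the loop breaks after at most max_length.toNat iterations, so the fuel is never exhausted.
def pyLoopA (a b c max_length : Int) : Nat → Int → List (Int × Int × Int) → List (Int × Int × Int)
  | 0, _, acc => acc.reverse
  | fuel + 1, k, acc =>
    if (k * a) + (k * b) + (k * c) > max_length then acc.reverse
    else pyLoopA a b c max_length fuel (k + 1) (pySort3 (k * a) (k * b) (k * c) :: acc)

def generate_pythag_triples (m : Int) (n : Int) (max_length : Int) : List (Int × Int × Int) :=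
  let a := m ^ 2 - n ^ 2
  let b := 2 * m * n
  let c := m ^ 2 + n ^ 2
  pyLoopA a b c max_length (max_length.toNat + 1) 1 []

-- ===== PORT B =====
-- B's countdown loop: 'while k >= 1: prepend (x,y,z); subtract base; k -= 1'.
-- The fuel is exactly k.toNat, the number of iterations the Python loop performs.
def loopB (lo mid hi : Int) : Nat → Int → Int → Int → Int → List (Int × Int × Int) → List (Int × Int × Int)
  | 0, _, _, _, _, acc => acc
  | fuel + 1, k, x, y, z, acc =>
    if k ≥ 1 then loopB lo mid hi fuel (k - 1) (x - lo) (y - mid) (z - hi) ((x, y, z) :: acc)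
    else acc

def generate_pythag_triples_alt (m : Int) (n : Int) (max_length : Int) : List (Int × Int × Int) :=
  let a := m * m - n * n
  let b := 2 * m * n
  let c := m * m + n * n
  let s := pySort3 a b c
  let k := PySem.Int.floordiv max_length (a + b + c)
  loopB s.1 s.2.1 s.2.2 k.toNat k (k * s.1) (k * s.2.1) (k * s.2.2) []

-- ===== PRECONDITION & SPEC =====
-- Pre_ excludes inputs with nonpositive perimeter a+b+c = 2*m*(m+n): there A either loops forever
-- or returns an accidental [] from the first break, while B's floor division raises (perimeter 0)
-- or yields a nonempty list of degenerate "triples" (perimeter < 0).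
def Pre_generate_pythag_triples (m : Int) (n : Int) (max_length : Int) : Prop :=
  0 < m * (m + n)
instance (m : Int) (n : Int) (max_length : Int) : Decidable (Pre_generate_pythag_triples m n max_length) := by unfold Pre_generate_pythag_triples; infer_instance

def pvWitness_generate_pythag_triples : Int × Int × Int := (2, 1, 100)

def Spec_generate_pythag_triples (m : Int) (n : Int) (max_length : Int) (out : List (Int × Int × Int)) : Prop := out = generate_pythag_triples_alt m n max_length
instance (m : Int) (n : Int) (max_length : Int) (out : List (Int × Int × Int)) : Decidable (Spec_generate_pythag_triples m n max_length out) := by unfold Spec_generate_pythag_triples; infer_instance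

-- ===== CLAIM (what is proved, stated in full; the proofs are below) =====
def Claim_equal_generate_pythag_triples : Prop := ∀ (m : Int) (n : Int) (max_length : Int), Dom_generate_pythag_triples m n max_length → Pre_generate_pythag_triples m n max_length → Spec_generate_pythag_triples m n max_length (generate_pythag_triples m n max_length)

-- ===== LEMMAS AND PROOFS =====

-- explicit characterisation of pySort3
theorem pySort3_def (x y z : Int) : pySort3 x y z =
    if y < x then (if z < y then (z, y, x) else if z < x then (y, z, x) else (y, x, z))
    else (if z < x then (z, x, y) else if z < y then (x, z, y) else (x, y, z)) := by
  simp only [pySort3, PySem.List.sorted_eq_foldl_insertBy, List.foldl, PySem.List.insertBy]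
  split_ifs <;> simp_all [PySem.List.insertBy] <;> split_ifs <;> simp_all <;> omega

-- multiplying by a positive k commutes with pySort3
theorem pySort3_scale (k x y z : Int) (hk : 0 < k) :
    pySort3 (k * x) (k * y) (k * z) =
      (k * (pySort3 x y z).1, k * (pySort3 x y z).2.1, k * (pySort3 x y z).2.2) := by
  rw [pySort3_def, pySort3_def]
  have hxy : k * y < k * x ↔ y < x := by constructor <;> intro h <;> nlinarith
  have hyz : k * z < k * y ↔ z < y := by constructor <;> intro h <;> nlinarith
  have hxz : k * z < k * x ↔ z < x := by constructor <;> intro h <;> nlinarith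
  simp only [hxy, hyz, hxz]
  split_ifs <;> simp

-- the loop of A unrolled to a map over the remaining range, given enough fuel
theorem pyLoopA_eq (a b c ml : Int) (hp : 2 ≤ a + b + c) :
    ∀ (fuel : Nat) (k : Int) (acc : List (Int × Int × Int)),
      (PySem.Int.floordiv ml (a + b + c) + 1 - k).toNat ≤ fuel →
      pyLoopA a b c ml fuel k acc =
        acc.reverse ++ (PySem.List.pyRange k (PySem.Int.floordiv ml (a + b + c) + 1) 1).map
          (fun j => pySort3 (j * a) (j * b) (j * c)) := by
  have hpos : (0 : Int) < a + b + c := by omega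
  have hfd := PySem.Int.floordiv_eq_ediv_of_pos (a := ml) hpos
  intro fuel
  induction fuel with
  | zero =>
    intro k acc hfuel
    have hk : PySem.Int.floordiv ml (a + b + c) + 1 ≤ k := by omega
    rw [PySem.List.pyRange_one_eq_nil hk]
    simp [pyLoopA]
  | succ f ih =>
    intro k acc hfuel
    have hbreak : (k * a) + (k * b) + (k * c) > ml ↔ PySem.Int.floordiv ml (a + b + c) < k := by
      rw [hfd]
      have hiff := Int.le_ediv_iff_mul_le (a := k) (b := ml) hpos
      constructor
      · intro hgt; by_contra hle
        have := hiff.mp (by omega)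
        nlinarith
      · intro hlt; by_contra hle
        have : k ≤ ml / (a + b + c) := hiff.mpr (by nlinarith)
        omega
    by_cases hc : (k * a) + (k * b) + (k * c) > ml
    · have hk : PySem.Int.floordiv ml (a + b + c) + 1 ≤ k := by
        have := hbreak.mp hc; omega
      rw [PySem.List.pyRange_one_eq_nil hk]
      simp [pyLoopA, hc]
    · have hk : k < PySem.Int.floordiv ml (a + b + c) + 1 := by
        rcases hbreak.not.mp hc with h
        omega
      rw [pyLoopA, if_neg hc, ih (k + 1) _ (by omega),
          PySem.List.pyRange_one_cons hk]
      simp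

-- B's countdown loop, started at k = n with the n-th multiple, produces the ascending range map
theorem loopB_eq (lo mid hi : Int) :
    ∀ (n : Nat) (acc : List (Int × Int × Int)),
      loopB lo mid hi n (n : Int) ((n : Int) * lo) ((n : Int) * mid) ((n : Int) * hi) acc =
        (PySem.List.pyRange 1 ((n : Int) + 1) 1).map (fun j => (j * lo, j * mid, j * hi)) ++ acc := by
  intro n
  induction n with
  | zero =>
    intro acc
    rw [PySem.List.pyRange_one_eq_nil (by norm_num)]
    simp [loopB]
  | succ f ih =>
    intro acc
    have h1 : ((f : Int) + 1) * lo - lo = (f : Int) * lo := by ring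
    have h2 : ((f : Int) + 1) * mid - mid = (f : Int) * mid := by ring
    have h3 : ((f : Int) + 1) * hi - hi = (f : Int) * hi := by ring
    rw [loopB, if_pos (by push_cast; omega)]
    push_cast
    have hk : (f : Int) + 1 - 1 = (f : Int) := by ring
    rw [hk, h1, h2, h3, ih]
    conv_rhs => rw [PySem.List.pyRange_one_succ_right (by push_cast; omega)]
    simp

-- kmax fits in A's fuel
theorem kmax_le_fuel (ml p : Int) (hp : 0 < p) :
    (PySem.Int.floordiv ml p + 1 - 1).toNat ≤ ml.toNat + 1 := by
  rw [PySem.Int.floordiv_eq_ediv_of_pos hp]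
  by_cases hml : 0 ≤ ml
  · have h1 : ml / p ≤ ml := Int.ediv_le_self p hml
    omega
  · have h1 : ml / p ≤ 0 / p := Int.ediv_le_ediv hp (by omega)
    simp at h1
    omega

-- ===== VERDICT (by name: the statement is the Claim_ definition above) =====
theorem generate_pythag_triples_spec : Claim_equal_generate_pythag_triples := by
  intro m n ml _hdom hpre
  unfold Pre_generate_pythag_triples at hpre
  unfold Spec_generate_pythag_triples generate_pythag_triples generate_pythag_triples_alt
  have hab : m * m - n * n = m ^ 2 - n ^ 2 := by ring
  have hac : m * m + n * n = m ^ 2 + n ^ 2 := by ring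
  rw [hab, hac]
  have hsum : (m ^ 2 - n ^ 2) + (2 * m * n) + (m ^ 2 + n ^ 2) = 2 * (m * (m + n)) := by ring
  have hp : 2 ≤ (m ^ 2 - n ^ 2) + (2 * m * n) + (m ^ 2 + n ^ 2) := by
    rw [hsum]; omega
  rw [pyLoopA_eq _ _ _ _ hp _ 1 [] (kmax_le_fuel ml _ (by omega))]
  simp only [List.reverse_nil, List.nil_append]
  set K := PySem.Int.floordiv ml ((m ^ 2 - n ^ 2) + (2 * m * n) + (m ^ 2 + n ^ 2)) with hK
  by_cases hKpos : 0 ≤ K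
  · have hKn : ((K.toNat : Int)) = K := Int.toNat_of_nonneg hKpos
    rw [show K = ((K.toNat : Int)) from hKn.symm, Int.toNat_natCast, loopB_eq]
    rw [List.append_nil]
    apply List.map_congr_left
    intro j hj
    have hj1 : 1 ≤ j := (PySem.List.mem_pyRange_one.mp hj).1
    exact pySort3_scale j _ _ _ (by omega)
  · have hKn : K.toNat = 0 := by omega
    rw [hKn]
    rw [PySem.List.pyRange_one_eq_nil (by omega)]
    simp [loopB]
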